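-- pv_equiv track=rewrite | github.com/Muffinous/DAA | zEXAMENES/ikea2.py | findPos
-- ===== SOURCE A (Python) =====
-- def findPos(lab, demanded, nf, nc):
--     x = None
--     y = None
--     for i in range(nf):
--         for j in range(nc):
--             element = lab[i][j]
--             if element == demanded:
--                 x = i
--                 y = j
--     return x, y
-- ===== SOURCE B (Python) =====
-- def findPos(lab, demanded, nf, nc):
--     # scan backwards and return the first hit: that is the last occurrence
--     for i in range(nf - 1, -1, -1):
--         for j in range(nc - 1, -1, -1):
--             if lab[i][j] == demanded:
--                 return i, j
--     return None, None
-- ===== Notes on version B (the rewrite author's own statement) =====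
-- stated objective: alternative
-- what changed: B scans the grid backwards (rows nf-1..0, columns nc-1..0) and returns the first match immediately, instead of A's full forward scan that overwrites an accumulator on every match.
import Mathlib
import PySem

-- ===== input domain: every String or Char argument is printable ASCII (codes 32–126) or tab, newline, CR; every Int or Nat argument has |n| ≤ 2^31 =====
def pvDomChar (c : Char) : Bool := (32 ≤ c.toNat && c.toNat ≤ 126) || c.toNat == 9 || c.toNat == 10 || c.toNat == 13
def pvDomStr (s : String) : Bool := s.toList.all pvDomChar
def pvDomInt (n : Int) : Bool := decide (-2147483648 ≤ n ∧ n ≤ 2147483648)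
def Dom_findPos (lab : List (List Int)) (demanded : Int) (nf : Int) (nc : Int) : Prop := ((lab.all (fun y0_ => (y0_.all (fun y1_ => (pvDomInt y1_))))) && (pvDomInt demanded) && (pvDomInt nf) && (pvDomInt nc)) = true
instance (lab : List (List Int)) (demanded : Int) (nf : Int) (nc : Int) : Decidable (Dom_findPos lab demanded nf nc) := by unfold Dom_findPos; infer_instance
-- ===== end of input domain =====

-- B scans the grid backwards and returns the first match (the last occurrence) immediately,
-- instead of A's full forward scan that overwrites an accumulator; same cost class, early exit.


-- ===== PORT A =====
def findPos (lab : List (List Int)) (demanded : Int) (nf : Int) (nc : Int) : Option Int × Option Int :=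
  (PySem.List.pyRange 0 nf 1).foldl (fun st i =>
    (PySem.List.pyRange 0 nc 1).foldl (fun st2 j =>
      let element := PySem.List.pyGetD (PySem.List.pyGetD lab i []) j 0
      if element == demanded then (some i, some j) else st2) st)
    (none, none)

-- ===== PORT B =====
-- inner backwards loop of Source B: first j in js with row[j] == demanded (early return)
def altCols (row : List Int) (demanded : Int) : List Int → Option Int
  | [] => none
  | j :: js => if PySem.List.pyGetD row j 0 == demanded then some j else altCols row demanded js

-- outer backwards loop of Source B: first row with a hit, returning immediately
def altRows (lab : List (List Int)) (demanded : Int) (nc : Int) : List Int → Option Int × Option Int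
  | [] => (none, none)
  | i :: is =>
    match altCols (PySem.List.pyGetD lab i []) demanded (PySem.List.pyRange (nc - 1) (-1) (-1)) with
    | some j => (some i, some j)
    | none => altRows lab demanded nc is

def findPos_alt (lab : List (List Int)) (demanded : Int) (nf : Int) (nc : Int) : Option Int × Option Int :=
  altRows lab demanded nc (PySem.List.pyRange (nf - 1) (-1) (-1))

-- ===== PRECONDITION & SPEC =====
-- Pre_ excludes exactly the inputs where Python A raises IndexError: when both loops run
-- (0 < nf and 0 < nc) every touched index must be in range.
def Pre_findPos (lab : List (List Int)) (demanded : Int) (nf : Int) (nc : Int) : Prop :=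
  0 < nf → 0 < nc → nf ≤ lab.length ∧ ∀ row ∈ lab.take nf.toNat, nc ≤ row.length
instance (lab : List (List Int)) (demanded : Int) (nf : Int) (nc : Int) : Decidable (Pre_findPos lab demanded nf nc) := by unfold Pre_findPos; infer_instance

def pvWitness_findPos : List (List Int) × Int × Int × Int := ([[1, 2], [3, 1]], 1, 2, 2)

def Spec_findPos (lab : List (List Int)) (demanded : Int) (nf : Int) (nc : Int) (out : Option Int × Option Int) : Prop := out = findPos_alt lab demanded nf nc
instance (lab : List (List Int)) (demanded : Int) (nf : Int) (nc : Int) (out : Option Int × Option Int) : Decidable (Spec_findPos lab demanded nf nc out) := by unfold Spec_findPos; infer_instance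

-- ===== CLAIM (what is proved, stated in full; the proofs are below) =====
def Claim_equal_findPos : Prop := ∀ (lab : List (List Int)) (demanded : Int) (nf : Int) (nc : Int), Dom_findPos lab demanded nf nc → Pre_findPos lab demanded nf nc → Spec_findPos lab demanded nf nc (findPos lab demanded nf nc)

-- ===== LEMMAS AND PROOFS =====

-- A's overwrite-fold over one list equals the first match on the reversed list.
theorem foldl_overwrite_eq_find_reverse {α β : Type} (p : α → Bool) (f : α → β) :
    ∀ (xs : List α) (st0 : β),
      xs.foldl (fun st x => if p x then f x else st) st0
        = ((xs.reverse.find? p).map f).getD st0 := by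
  intro xs
  induction xs with
  | nil => intro st0; simp
  | cons x xs ih =>
    intro st0
    simp only [List.foldl_cons, List.reverse_cons, List.find?_append, ih]
    cases h : xs.reverse.find? p with
    | some y => simp
    | none =>
      cases hp : p x <;> simp [List.find?, hp]

-- Outer overwrite-fold with optional per-element results equals findSome? on the reverse.
theorem foldl_getD_eq_findSome_reverse {α γ : Type} (h : α → Option γ) :
    ∀ (xs : List α) (st0 : γ),
      xs.foldl (fun st i => ((h i).map id).getD st) st0
        = (xs.reverse.findSome? h).getD st0 := by
  intro xs
  induction xs with
  | nil => intro st0; simp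
  | cons x xs ih =>
    intro st0
    simp only [List.foldl_cons, List.reverse_cons, List.findSome?_append, ih]
    cases hf : xs.reverse.findSome? h with
    | some y => simp
    | none =>
      cases hx : h x <;> simp [List.findSome?, hx]

theorem altCols_eq_find (row : List Int) (demanded : Int) :
    ∀ js : List Int,
      altCols row demanded js = js.find? (fun j => PySem.List.pyGetD row j 0 == demanded) := by
  intro js
  induction js with
  | nil => rfl
  | cons j js ih =>
    simp only [altCols, List.find?]
    cases h : (PySem.List.pyGetD row j 0 == demanded) <;> simp [ih]

theorem altRows_eq_findSome (lab : List (List Int)) (demanded : Int) (nc : Int) :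
    ∀ is : List Int,
      altRows lab demanded nc is
        = (is.findSome? (fun i =>
            (((PySem.List.pyRange (nc - 1) (-1) (-1)).find?
                (fun j => PySem.List.pyGetD (PySem.List.pyGetD lab i []) j 0 == demanded)).map
              (fun j => ((some i, some j) : Option Int × Option Int))))).getD (none, none) := by
  intro is
  induction is with
  | nil => rfl
  | cons i is ih =>
    simp only [altRows, List.findSome?, altCols_eq_find]
    cases h : (PySem.List.pyRange (nc - 1) (-1) (-1)).find?
        (fun j => PySem.List.pyGetD (PySem.List.pyGetD lab i []) j 0 == demanded) with
    | some j => simp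
    | none => simp [ih]

theorem pyRange_countdown_reverse (n : Int) :
    PySem.List.pyRange (n - 1) (-1) (-1) = (PySem.List.pyRange 0 n 1).reverse := by
  rw [PySem.List.pyRange_neg_one_eq_reverse]
  norm_num

-- ===== VERDICT (by name: the statement is the Claim_ definition above) =====
theorem findPos_spec : Claim_equal_findPos := by
  intro lab demanded nf nc _ _
  unfold Spec_findPos findPos findPos_alt
  rw [altRows_eq_findSome, pyRange_countdown_reverse, pyRange_countdown_reverse]
  have inner : ∀ st : Option Int × Option Int, ∀ i : Int,
      (PySem.List.pyRange 0 nc 1).foldl (fun st2 j =>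
          let element := PySem.List.pyGetD (PySem.List.pyGetD lab i []) j 0
          if element == demanded then (some i, some j) else st2) st
        = ((((PySem.List.pyRange 0 nc 1).reverse.find?
              (fun j => PySem.List.pyGetD (PySem.List.pyGetD lab i []) j 0 == demanded)).map
            (fun j => ((some i, some j) : Option Int × Option Int))).map id).getD st := by
    intro st i
    rw [foldl_overwrite_eq_find_reverse
      (fun j => PySem.List.pyGetD (PySem.List.pyGetD lab i []) j 0 == demanded)
      (fun j => ((some i, some j) : Option Int × Option Int))]
    simp
  calc (PySem.List.pyRange 0 nf 1).foldl (fun st i =>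
          (PySem.List.pyRange 0 nc 1).foldl (fun st2 j =>
            let element := PySem.List.pyGetD (PySem.List.pyGetD lab i []) j 0
            if element == demanded then (some i, some j) else st2) st) (none, none)
      = (PySem.List.pyRange 0 nf 1).foldl (fun st i =>
          ((((PySem.List.pyRange 0 nc 1).reverse.find?
              (fun j => PySem.List.pyGetD (PySem.List.pyGetD lab i []) j 0 == demanded)).map
            (fun j => ((some i, some j) : Option Int × Option Int))).map id).getD st) (none, none) := by
        apply PySem.List.foldl_congr_mem
        intro st i _
        exact inner st i
    _ = _ := by
        rw [foldl_getD_eq_findSome_reverse (fun i =>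
          (((PySem.List.pyRange 0 nc 1).reverse.find?
              (fun j => PySem.List.pyGetD (PySem.List.pyGetD lab i []) j 0 == demanded)).map
            (fun j => ((some i, some j) : Option Int × Option Int))))]
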